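-- pv_equiv track=rewrite | github.com/DDongYul/AlgorithmStudy | backtracking/완전탐색-리스트에서 원소 한번씩 빼고 탐색-프로그래머스-전력망 둘로 나누기 .py | BFS
-- ===== SOURCE A (Python) =====
-- from collections import deque
--
-- def BFS(wires):
--     graph = [[] for _ in range(len(wires)+2)]
--     for a,b in wires:
--         graph[a-1].append(b-1)
--         graph[b-1].append(a-1)
--     queue = deque()
--     queue.append(0)
--     visited = [0 for _ in range(len(wires)+2)]
--     while queue:
--         curr = queue.popleft()
--         if not visited[curr]:
--             for i in graph[curr]:
--                 queue.append(i)
--             visited[curr] = 1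
--     return abs((len(wires)+2 - sum(visited))-sum(visited))
-- ===== SOURCE B (Python) =====
-- def BFS(wires):
--     # Connected-component size by fixpoint propagation: keep one boolean per node
--     # ("connected to node 0 so far") and sweep the wire list until nothing changes.
--     n = len(wires) + 2
--     conn = [False] * n
--     conn[0] = True
--     changed = True
--     while changed:
--         changed = False
--         for a, b in wires:
--             if conn[a - 1] != conn[b - 1]:
--                 conn[a - 1] = conn[b - 1] = True
--                 changed = True
--     k = conn.count(True)
--     return abs(n - 2 * k)
-- ===== Notes on version B (the rewrite author's own statement) =====
-- stated objective: alternative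
-- what changed: Replaces the deque-BFS over an explicitly built adjacency list by a boolean-array fixpoint propagation: keep one flag per node ('connected to node 0 so far') and repeatedly sweep the raw wire list, setting both endpoints' flags whenever they disagree, until a sweep changes nothing; no queue and no adjacency list are built.
import Mathlib
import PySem

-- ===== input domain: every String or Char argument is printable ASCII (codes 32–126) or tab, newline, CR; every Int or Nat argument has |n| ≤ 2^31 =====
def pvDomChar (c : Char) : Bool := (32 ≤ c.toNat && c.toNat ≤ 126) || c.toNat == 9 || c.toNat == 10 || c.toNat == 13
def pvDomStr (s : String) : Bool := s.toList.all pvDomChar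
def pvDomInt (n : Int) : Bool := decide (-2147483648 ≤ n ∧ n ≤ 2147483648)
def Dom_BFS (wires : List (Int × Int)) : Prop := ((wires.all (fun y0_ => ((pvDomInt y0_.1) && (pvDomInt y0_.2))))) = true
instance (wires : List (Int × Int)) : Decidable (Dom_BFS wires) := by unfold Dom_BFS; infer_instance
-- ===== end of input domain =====

-- B replaces A's deque-BFS over a built adjacency list by a fixpoint propagation over the raw
-- wire list (objective: alternative algorithm, same return value on node labels 1..len+2).

-- ===== PORT A =====
-- termination helper for loopA (cited in its decreasing_by): a successful mark turns a 0 into a 1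
theorem pv_count_set (v : List Int) (k : Nat) (hk : k < v.length) (hv : v[k] = 0) :
    (v.set k 1).count 0 + 1 = v.count 0 := by
  induction v generalizing k with
  | nil => simp at hk
  | cons a tl ih =>
    cases k with
    | zero => simp at hv; subst hv; simp
    | succ k =>
      simp only [List.set_cons_succ, List.count_cons]
      have := ih k (by simpa using hk) (by simpa using hv)
      omega

theorem pv_count_set_lt (v : List Int) (i : Int) (h : PySem.List.pyGetD v i 1 = 0) :
    (PySem.List.pySetD v i 1).count 0 < v.count 0 := by
  simp only [PySem.List.pyGetD, PySem.List.pyGet?, PySem.List.pySetD, PySem.List.pySet?,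
    PySem.List.pyIdx?] at h ⊢
  by_cases h0 : 0 ≤ i
  · by_cases h1 : i < (v.length : Int)
    · have hk : i.toNat < v.length := by omega
      simp only [if_pos h0, if_pos h1, Option.bind_some, Option.map_some, Option.getD_some,
        List.getElem?_eq_getElem hk, Option.getD_some] at h ⊢
      have := pv_count_set v i.toNat hk h
      omega
    · simp [h0, h1] at h
  · by_cases h2 : -(v.length : Int) ≤ i
    · have hlen : 0 < v.length := by omega
      have hk : v.length - (-i).toNat < v.length := by omega
      simp only [if_neg h0, if_pos h2, Option.bind_some, Option.map_some, Option.getD_some,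
        List.getElem?_eq_getElem hk, Option.getD_some] at h ⊢
      have := pv_count_set v _ hk h
      omega
    · simp [h0, h2] at h

-- while queue: pop left; if not visited[curr]: push graph[curr], mark curr
def loopA (g : List (List Int)) (queue visited : List Int) : List Int :=
  match queue with
  | [] => visited
  | curr :: rest =>
    if h : PySem.List.pyGetD visited curr 1 = 0 then
      loopA g (rest ++ PySem.List.pyGetD g curr []) (PySem.List.pySetD visited curr 1)
    else
      loopA g rest visited
termination_by (visited.count 0, queue.length)
decreasing_by
  · exact Prod.Lex.left _ _ (pv_count_set_lt _ _ h)
  · exact Prod.Lex.right _ (by simp)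

-- graph[a-1].append(b-1); graph[b-1].append(a-1)
def buildStep (g : List (List Int)) (p : Int × Int) : List (List Int) :=
  let g1 := PySem.List.pySetD g (p.1 - 1) (PySem.List.pyGetD g (p.1 - 1) [] ++ [p.2 - 1])
  PySem.List.pySetD g1 (p.2 - 1) (PySem.List.pyGetD g1 (p.2 - 1) [] ++ [p.1 - 1])

def BFS (wires : List (Int × Int)) : Int :=
  let graph := wires.foldl buildStep (List.replicate (wires.length + 2) [])
  let visited := loopA graph [0] (List.replicate (wires.length + 2) 0)
  |((wires.length : Int) + 2 - visited.sum) - visited.sum|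

-- ===== PORT B =====
-- one wire: if conn[a-1] != conn[b-1]: conn[a-1] = conn[b-1] = True; changed = True
def stepC (st : List Bool × Bool) (p : Int × Int) : List Bool × Bool :=
  if PySem.List.pyGetD st.1 (p.1 - 1) false ≠ PySem.List.pyGetD st.1 (p.2 - 1) false then
    (PySem.List.pySetD (PySem.List.pySetD st.1 (p.1 - 1) true) (p.2 - 1) true, true)
  else st

-- one sweep: changed = False; for a, b in wires: …
def passC (wires : List (Int × Int)) (conn : List Bool) : List Bool × Bool :=
  wires.foldl stepC (conn, false)

-- 'while changed:' — fuel only bounds the sweeps: every sweep that sets changed turns at least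
-- one of the len(wires)+2 flags from False to True
def loopC (wires : List (Int × Int)) : Nat → List Bool → List Bool
  | 0, conn => conn
  | fuel + 1, conn =>
    let st := passC wires conn
    if st.2 then loopC wires fuel st.1 else st.1

def BFS_alt (wires : List (Int × Int)) : Int :=
  let n := wires.length + 2
  let conn := loopC wires n (PySem.List.pySetD (List.replicate n false) 0 true)
  |(n : Int) - 2 * (conn.count true : Int)|

-- ===== PRECONDITION & SPEC =====
-- Pre_ excludes exactly the inputs on which A raises IndexError: a wire endpoint whose 0-based
-- index a-1 falls outside Python's legal index range [-(len+2), len+1] for the graph list.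
def Pre_BFS (wires : List (Int × Int)) : Prop :=
  ∀ p ∈ wires, (-((wires.length : Int) + 1) ≤ p.1 ∧ p.1 ≤ (wires.length : Int) + 2) ∧
               (-((wires.length : Int) + 1) ≤ p.2 ∧ p.2 ≤ (wires.length : Int) + 2)
instance (wires : List (Int × Int)) : Decidable (Pre_BFS wires) := by unfold Pre_BFS; infer_instance

def pvWitness_BFS : (List (Int × Int)) := [(1, 2), (2, 3)]

def Spec_BFS (wires : List (Int × Int)) (out : Int) : Prop := out = BFS_alt wires
instance (wires : List (Int × Int)) (out : Int) : Decidable (Spec_BFS wires out) := by unfold Spec_BFS; infer_instance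

-- ===== CLAIM (what is proved, stated in full; the proofs are below) =====
def Claim_equal_BFS : Prop := ∀ (wires : List (Int × Int)), Dom_BFS wires → Pre_BFS wires → Spec_BFS wires (BFS wires)

-- ===== LEMMAS AND PROOFS =====

-- the symmetric adjacency relation of the wire list, on the array slots (x-1) % n
def EdgeR (wires : List (Int × Int)) (u v : Int) : Prop :=
  ∃ p ∈ wires,
    (u = PySem.Int.mod (p.1 - 1) ((wires.length : Int) + 2) ∧
     v = PySem.Int.mod (p.2 - 1) ((wires.length : Int) + 2)) ∨
    (u = PySem.Int.mod (p.2 - 1) ((wires.length : Int) + 2) ∧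
     v = PySem.Int.mod (p.1 - 1) ((wires.length : Int) + 2))

def Reach (wires : List (Int × Int)) (x : Int) : Prop :=
  Relation.ReflTransGen (EdgeR wires) 0 x

-- ---------- generic helpers ----------

theorem pyGetD_toNat {α : Type} (g : List α) (i : Int) (d : α) (h0 : 0 ≤ i)
    (h1 : i < (g.length : Int)) : PySem.List.pyGetD g i d = g.getD i.toNat d := by
  have hk : i.toNat < g.length := by omega
  rw [PySem.List.pyGetD_eq_getElem g d h0 h1, List.getD_eq_getElem?_getD,
    List.getElem?_eq_getElem hk, Option.getD_some]

theorem getD_set_cases (v : List Int) (k : Nat) (x : Int) (j : Nat) (d : Int) :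
    (v.set k x).getD j d = v.getD j d ∨ ((v.set k x).getD j d = x ∧ j = k) := by
  rw [List.getD_eq_getElem?_getD, List.getD_eq_getElem?_getD, List.getElem?_set]
  by_cases hjk : k = j
  · subst hjk
    by_cases hk : k < v.length
    · simp [hk]
    · simp [hk]
  · simp [hjk]

theorem getD_pySetD_cases (v : List Int) (i : Int) (x : Int) (j : Nat) (d : Int) :
    (PySem.List.pySetD v i x).getD j d = v.getD j d ∨ (PySem.List.pySetD v i x).getD j d = x := by
  simp only [PySem.List.pySetD, PySem.List.pySet?, PySem.List.pyIdx?]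
  by_cases h0 : 0 ≤ i
  · by_cases h1 : i < (v.length : Int)
    · simp only [if_pos h0, if_pos h1, Option.map_some, Option.getD_some]
      exact (getD_set_cases v i.toNat x j d).imp id (fun h => h.1)
    · simp [h0, h1]
  · by_cases h2 : -(v.length : Int) ≤ i
    · simp only [if_neg h0, if_pos h2, Option.map_some, Option.getD_some]
      exact (getD_set_cases v _ x j d).imp id (fun h => h.1)
    · simp [h0, h2]

theorem getD_pySetD_one_of_one (v : List Int) (i : Int) (j : Nat)
    (h : v.getD j 0 = 1) : (PySem.List.pySetD v i 1).getD j 0 = 1 := by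
  rcases getD_pySetD_cases v i 1 j 0 with h' | h'
  · rw [h']; exact h
  · exact h'

-- ---------- Python floor-mod facts ----------

theorem pymod_emod (z n : Int) (hn : 0 ≤ n) : PySem.Int.mod z n = z % n := by
  rw [PySem.Int.mod, Int.fmod_eq_emod]
  simp [hn]

theorem pymod_nonneg (z L : Int) (hL : 0 < L) : 0 ≤ PySem.Int.mod z L := by
  rw [pymod_emod _ _ (le_of_lt hL)]
  exact Int.emod_nonneg z (by omega)

theorem pymod_lt (z L : Int) (hL : 0 < L) : PySem.Int.mod z L < L := by
  rw [pymod_emod _ _ (le_of_lt hL)]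
  exact Int.emod_lt_of_pos z hL

theorem pymod_toNat_lt (L : Nat) (c : Int) (hL : 0 < (L : Int)) :
    (PySem.Int.mod c (L : Int)).toNat < L := by
  have h1 := pymod_lt c (L : Int) hL
  have h2 := pymod_nonneg c (L : Int) hL
  omega

theorem pymod_cast (L : Nat) (c : Int) (hL : 0 < (L : Int)) :
    ((PySem.Int.mod c (L : Int)).toNat : Int) = PySem.Int.mod c (L : Int) := by
  have h2 := pymod_nonneg c (L : Int) hL
  omega

theorem pymod_small (z L : Int) (h0 : 0 ≤ z) (h1 : z < L) : PySem.Int.mod z L = z := by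
  rw [pymod_emod _ _ (by omega)]
  exact Int.emod_eq_of_lt h0 h1

theorem pymod_neg (z L : Int) (h0 : -L ≤ z) (h1 : z < 0) : PySem.Int.mod z L = z + L := by
  have hL : 0 < L := by omega
  rw [pymod_emod _ _ (by omega)]
  have h2 : (z + L) % L = z % L := Int.add_emod_right z L
  rw [← h2]
  exact Int.emod_eq_of_lt (by omega) (by omega)

theorem pyGetD_slot {α : Type} (g : List α) (i : Int) (d : α)
    (h0 : -(g.length : Int) ≤ i) (h1 : i < (g.length : Int)) :
    PySem.List.pyGetD g i d = g.getD (PySem.Int.mod i (g.length : Int)).toNat d := by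
  by_cases hi : 0 ≤ i
  · rw [pyGetD_toNat g i d hi h1, pymod_small i _ hi h1]
  · have hmod : PySem.Int.mod i (g.length : Int) = i + g.length := pymod_neg i _ h0 (by omega)
    simp only [PySem.List.pyGetD, PySem.List.pyGet?, PySem.List.pyIdx?, if_neg hi, if_pos h0,
      Option.bind_some]
    rw [hmod, List.getD_eq_getElem?_getD]
    have he : (i + (g.length : Int)).toNat = g.length - (-i).toNat := by omega
    rw [he]

theorem pySetD_slot {α : Type} (v : List α) (i : Int) (x : α)
    (h0 : -(v.length : Int) ≤ i) (h1 : i < (v.length : Int)) :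
    PySem.List.pySetD v i x = v.set (PySem.Int.mod i (v.length : Int)).toNat x := by
  by_cases hi : 0 ≤ i
  · rw [PySem.List.pySetD_of_nonneg v x hi, pymod_small i _ hi h1]
  · have hmod : PySem.Int.mod i (v.length : Int) = i + v.length := pymod_neg i _ h0 (by omega)
    simp only [PySem.List.pySetD, PySem.List.pySet?, PySem.List.pyIdx?, if_neg hi, if_pos h0,
      Option.map_some, Option.getD_some]
    rw [hmod]
    congr 1
    omega

theorem reach_range (wires : List (Int × Int)) (x : Int)
    (hx : Reach wires x) : 0 ≤ x ∧ x < (wires.length : Int) + 2 := by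
  have hL : 0 < (wires.length : Int) + 2 := by omega
  induction hx with
  | refl => omega
  | tail _ he _ =>
    obtain ⟨p, _, hcase⟩ := he
    rcases hcase with ⟨_, rfl⟩ | ⟨_, rfl⟩ <;>
      exact ⟨pymod_nonneg _ _ hL, pymod_lt _ _ hL⟩

-- ---------- A-side: the adjacency list realises EdgeR ----------

theorem getD_set_gen {α : Type} (g : List α) (k : Nat) (v : α) (j : Nat) (d : α)
    (hk : k < g.length) : (g.set k v).getD j d = if j = k then v else g.getD j d := by
  rw [List.getD_eq_getElem?_getD, List.getD_eq_getElem?_getD, List.getElem?_set]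
  split_ifs with h1 h2 h3
  · simp
  · exact absurd h1.symm h2
  · exact absurd h3.symm h1
  · rfl

theorem buildStep_length (g : List (List Int)) (p : Int × Int) :
    (buildStep g p).length = g.length := by
  simp [buildStep, PySem.List.length_pySetD]

theorem build_length (l : List (Int × Int)) (g : List (List Int)) :
    (l.foldl buildStep g).length = g.length := by
  induction l generalizing g with
  | nil => rfl
  | cons p l ih => rw [List.foldl_cons, ih, buildStep_length]

theorem buildStep_mem (g : List (List Int)) (p : Int × Int)
    (h1 : -(g.length : Int) ≤ p.1 - 1) (h2 : p.1 - 1 < (g.length : Int))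
    (h3 : -(g.length : Int) ≤ p.2 - 1) (h4 : p.2 - 1 < (g.length : Int)) (j : Nat) (x : Int) :
    x ∈ (buildStep g p).getD j [] ↔
      x ∈ g.getD j [] ∨
      ((j : Int) = PySem.Int.mod (p.1 - 1) (g.length : Int) ∧ x = p.2 - 1) ∨
      ((j : Int) = PySem.Int.mod (p.2 - 1) (g.length : Int) ∧ x = p.1 - 1) := by
  have hL : 0 < (g.length : Int) := by omega
  obtain ⟨m1, hm1a, hm1b, hm1e⟩ :
      ∃ m, 0 ≤ m ∧ m < (g.length : Int) ∧ PySem.Int.mod (p.1 - 1) (g.length : Int) = m :=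
    ⟨_, pymod_nonneg _ _ hL, pymod_lt _ _ hL, rfl⟩
  obtain ⟨m2, hm2a, hm2b, hm2e⟩ :
      ∃ m, 0 ≤ m ∧ m < (g.length : Int) ∧ PySem.Int.mod (p.2 - 1) (g.length : Int) = m :=
    ⟨_, pymod_nonneg _ _ hL, pymod_lt _ _ hL, rfl⟩
  have hk1 : m1.toNat < g.length := by omega
  have e1 : PySem.List.pyGetD g (p.1 - 1) [] = g.getD m1.toNat [] := by
    rw [pyGetD_slot g _ _ h1 h2, hm1e]
  have es1 : PySem.List.pySetD g (p.1 - 1) (g.getD m1.toNat [] ++ [p.2 - 1])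
      = g.set m1.toNat (g.getD m1.toNat [] ++ [p.2 - 1]) := by
    rw [pySetD_slot g _ _ h1 h2, hm1e]
  simp only [buildStep, e1, es1]
  have hg1len : (g.set m1.toNat (g.getD m1.toNat [] ++ [p.2 - 1])).length = g.length := by
    simp
  have e2 : PySem.List.pyGetD (g.set m1.toNat (g.getD m1.toNat [] ++ [p.2 - 1])) (p.2 - 1) []
      = (g.set m1.toNat (g.getD m1.toNat [] ++ [p.2 - 1])).getD m2.toNat [] := by
    rw [pyGetD_slot _ _ _ (by rw [hg1len]; exact h3) (by rw [hg1len]; exact h4), hg1len, hm2e]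
  have es2 : ∀ w : List Int, PySem.List.pySetD (g.set m1.toNat (g.getD m1.toNat [] ++ [p.2 - 1])) (p.2 - 1) w
      = (g.set m1.toNat (g.getD m1.toNat [] ++ [p.2 - 1])).set m2.toNat w := by
    intro w
    rw [pySetD_slot _ _ _ (by rw [hg1len]; exact h3) (by rw [hg1len]; exact h4), hg1len, hm2e]
  rw [e2, es2, hm1e, hm2e]
  have hk2 : m2.toNat < (g.set m1.toNat (g.getD m1.toNat [] ++ [p.2 - 1])).length := by
    rw [hg1len]; omega
  rw [getD_set_gen _ _ _ _ _ hk2]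
  by_cases hj2 : j = m2.toNat
  · rw [if_pos hj2]
    rw [getD_set_gen _ _ _ _ _ hk1]
    subst hj2
    by_cases hj1 : m2.toNat = m1.toNat
    · rw [if_pos hj1, hj1]
      constructor
      · intro hx
        rcases List.mem_append.1 hx with hx | hx
        · rcases List.mem_append.1 hx with hx | hx
          · exact Or.inl hx
          · exact Or.inr (Or.inl ⟨by omega, by simpa using hx⟩)
        · exact Or.inr (Or.inr ⟨by omega, by simpa using hx⟩)
      · rintro (hx | ⟨hj, rfl⟩ | ⟨hj, rfl⟩)
        · exact List.mem_append.2 (Or.inl (List.mem_append.2 (Or.inl hx)))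
        · exact List.mem_append.2 (Or.inl (List.mem_append.2 (Or.inr (by simp))))
        · exact List.mem_append.2 (Or.inr (by simp))
    · rw [if_neg hj1]
      constructor
      · intro hx
        rcases List.mem_append.1 hx with hx | hx
        · exact Or.inl hx
        · exact Or.inr (Or.inr ⟨by omega, by simpa using hx⟩)
      · rintro (hx | ⟨hj, rfl⟩ | ⟨hj, rfl⟩)
        · exact List.mem_append.2 (Or.inl hx)
        · exact absurd (by omega : m2.toNat = m1.toNat) hj1
        · exact List.mem_append.2 (Or.inr (by simp))
  · rw [if_neg hj2]
    rw [getD_set_gen _ _ _ _ _ hk1]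
    by_cases hj1 : j = m1.toNat
    · rw [if_pos hj1]
      subst hj1
      constructor
      · intro hx
        rcases List.mem_append.1 hx with hx | hx
        · exact Or.inl hx
        · exact Or.inr (Or.inl ⟨by omega, by simpa using hx⟩)
      · rintro (hx | ⟨hj, rfl⟩ | ⟨hj, rfl⟩)
        · exact List.mem_append.2 (Or.inl hx)
        · exact List.mem_append.2 (Or.inr (by simp))
        · exact (hj2 (by omega)).elim
    · rw [if_neg hj1]
      constructor
      · exact fun h => Or.inl h
      · rintro (hx | ⟨hj, rfl⟩ | ⟨hj, rfl⟩)
        · exact hx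
        · exact (hj1 (by omega)).elim
        · exact (hj2 (by omega)).elim

theorem build_mem (l : List (Int × Int)) (g : List (List Int))
    (hl : ∀ p ∈ l, -(g.length : Int) ≤ p.1 - 1 ∧ p.1 - 1 < (g.length : Int) ∧
                   -(g.length : Int) ≤ p.2 - 1 ∧ p.2 - 1 < (g.length : Int)) :
    ∀ (j : Nat) (x : Int), x ∈ (l.foldl buildStep g).getD j [] ↔
      x ∈ g.getD j [] ∨ ∃ p ∈ l,
        ((j : Int) = PySem.Int.mod (p.1 - 1) (g.length : Int) ∧ x = p.2 - 1) ∨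
        ((j : Int) = PySem.Int.mod (p.2 - 1) (g.length : Int) ∧ x = p.1 - 1) := by
  induction l generalizing g with
  | nil => simp
  | cons p l ih =>
    intro j x
    obtain ⟨h1, h2, h3, h4⟩ := hl p List.mem_cons_self
    have hbl : (buildStep g p).length = g.length := buildStep_length g p
    rw [List.foldl_cons,
      ih (buildStep g p) (by rw [hbl]; exact fun q hq => hl q (List.mem_cons_of_mem _ hq)) j x,
      buildStep_mem g p h1 h2 h3 h4 j x]
    rw [hbl]
    constructor
    · rintro ((h | h | h) | ⟨q, hq, hcase⟩)
      · exact Or.inl h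
      · exact Or.inr ⟨p, List.mem_cons_self, Or.inl h⟩
      · exact Or.inr ⟨p, List.mem_cons_self, Or.inr h⟩
      · exact Or.inr ⟨q, List.mem_cons_of_mem _ hq, hcase⟩
    · rintro (h | ⟨q, hq, hcase⟩)
      · exact Or.inl (Or.inl h)
      · rcases List.mem_cons.1 hq with rfl | hq
        · rcases hcase with h | h
          · exact Or.inl (Or.inr (Or.inl h))
          · exact Or.inl (Or.inr (Or.inr h))
        · exact Or.inr ⟨q, hq, hcase⟩

theorem getD_replicate_nil (n j : Nat) : (List.replicate n ([] : List Int)).getD j [] = [] := by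
  rw [List.getD_eq_getElem?_getD, List.getElem?_replicate]
  split <;> rfl

theorem graph_mem (wires : List (Int × Int)) (hp : Pre_BFS wires) (j : Nat) (x : Int) :
    x ∈ (wires.foldl buildStep (List.replicate (wires.length + 2) [])).getD j [] ↔
      ∃ p ∈ wires,
        ((j : Int) = PySem.Int.mod (p.1 - 1) ((wires.length : Int) + 2) ∧ x = p.2 - 1) ∨
        ((j : Int) = PySem.Int.mod (p.2 - 1) ((wires.length : Int) + 2) ∧ x = p.1 - 1) := by
  have hcast : ((List.replicate (wires.length + 2) ([] : List Int)).length : Int)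
      = (wires.length : Int) + 2 := by simp
  rw [build_mem wires _ (by
    intro p hmem
    have := hp p hmem
    rw [hcast]
    omega), getD_replicate_nil, hcast]
  simp only [List.not_mem_nil, false_or]

-- ---------- A-side: the BFS loop marks exactly the reachable slots ----------

theorem loopA_length (g : List (List Int)) (q v : List Int) : (loopA g q v).length = v.length := by
  induction q, v using loopA.induct g with
  | case1 v => rw [loopA.eq_def]
  | case2 v curr rest h ih =>
    rw [loopA.eq_def]; dsimp only; rw [dif_pos h]
    rw [ih, PySem.List.length_pySetD]
  | case3 v curr rest h ih =>
    rw [loopA.eq_def]; dsimp only; rw [dif_neg h]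
    exact ih

theorem loopA_vals (g : List (List Int)) (q v : List Int) :
    (∀ j : Nat, v.getD j 0 = 0 ∨ v.getD j 0 = 1) →
    ∀ j : Nat, (loopA g q v).getD j 0 = 0 ∨ (loopA g q v).getD j 0 = 1 := by
  induction q, v using loopA.induct g with
  | case1 v => intro hv j; rw [loopA.eq_def]; exact hv j
  | case2 v curr rest h ih =>
    intro hv
    rw [loopA.eq_def]; dsimp only; rw [dif_pos h]
    refine ih fun j => ?_
    rcases getD_pySetD_cases v curr 1 j 0 with h' | h'
    · rw [h']; exact hv j
    · rw [h']; exact Or.inr rfl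
  | case3 v curr rest h ih =>
    intro hv
    rw [loopA.eq_def]; dsimp only; rw [dif_neg h]
    exact ih hv

theorem loopA_mono (g : List (List Int)) (q v : List Int) :
    ∀ j : Nat, v.getD j 0 = 1 → (loopA g q v).getD j 0 = 1 := by
  induction q, v using loopA.induct g with
  | case1 v => intro j hj; rw [loopA.eq_def]; exact hj
  | case2 v curr rest h ih =>
    intro j hj
    rw [loopA.eq_def]; dsimp only; rw [dif_pos h]
    exact ih j (getD_pySetD_one_of_one v curr j hj)
  | case3 v curr rest h ih =>
    intro j hj
    rw [loopA.eq_def]; dsimp only; rw [dif_neg h]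
    exact ih j hj

theorem unmarked_ne (v : List Int) (curr : Int) (h : ¬ PySem.List.pyGetD v curr 1 = 0)
    (hc0 : -(v.length : Int) ≤ curr) (hc1 : curr < (v.length : Int))
    (hv01 : ∀ j : Nat, v.getD j 0 = 0 ∨ v.getD j 0 = 1) :
    v.getD (PySem.Int.mod curr (v.length : Int)).toNat 0 = 1 := by
  have hL : 0 < (v.length : Int) := by omega
  have hkr : (PySem.Int.mod curr (v.length : Int)).toNat < v.length := pymod_toNat_lt _ _ hL
  have e : PySem.List.pyGetD v curr 1 = v.getD (PySem.Int.mod curr (v.length : Int)).toNat 1 :=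
    pyGetD_slot v curr 1 hc0 hc1
  rcases hv01 (PySem.Int.mod curr (v.length : Int)).toNat with h0 | h1
  · exfalso
    apply h
    rw [e, List.getD_eq_getElem?_getD, List.getElem?_eq_getElem hkr]
    rw [List.getD_eq_getElem?_getD, List.getElem?_eq_getElem hkr] at h0
    simpa using h0
  · exact h1

theorem loopA_queue (g : List (List Int)) (q v : List Int) :
    g.length = v.length →
    (∀ (j : Nat) (x : Int), x ∈ g.getD j [] → -(v.length : Int) ≤ x ∧ x < (v.length : Int)) →
    (∀ j : Nat, v.getD j 0 = 0 ∨ v.getD j 0 = 1) →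
    (∀ c ∈ q, -(v.length : Int) ≤ c ∧ c < (v.length : Int)) →
    ∀ c ∈ q, (loopA g q v).getD (PySem.Int.mod c (v.length : Int)).toNat 0 = 1 := by
  induction q, v using loopA.induct g with
  | case1 v => intro _ _ _ _ c hc; cases hc
  | case2 v curr rest h ih =>
    intro hgl hgv hv01 hq c hc
    obtain ⟨hc0, hc1⟩ := hq curr List.mem_cons_self
    have hL : 0 < (v.length : Int) := by omega
    have hset : PySem.List.pySetD v curr 1
        = v.set (PySem.Int.mod curr (v.length : Int)).toNat 1 := pySetD_slot v curr 1 hc0 hc1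
    have hlen' : (PySem.List.pySetD v curr 1).length = v.length := PySem.List.length_pySetD _ _ _
    have hkn : (PySem.Int.mod curr (v.length : Int)).toNat < v.length := pymod_toNat_lt _ _ hL
    have hmarked : (PySem.List.pySetD v curr 1).getD (PySem.Int.mod curr (v.length : Int)).toNat 0 = 1 := by
      rw [hset, getD_set_gen _ _ _ _ _ hkn, if_pos rfl]
    have hgNat : PySem.List.pyGetD g curr []
        = g.getD (PySem.Int.mod curr (v.length : Int)).toNat [] := by
      rw [pyGetD_slot g curr [] (by rw [hgl]; exact hc0) (by rw [hgl]; exact hc1), hgl]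
    rw [loopA.eq_def]; dsimp only; rw [dif_pos h]
    rcases List.mem_cons.1 hc with rfl | hc
    · exact loopA_mono g _ _ _ hmarked
    · have hres := ih ?_ ?_ ?_ ?_ c (List.mem_append_left _ hc)
      · rwa [hlen'] at hres
      · rw [hlen']; exact hgl
      · intro j' x' hx'; rw [hlen']; exact hgv j' x' hx'
      · intro j'
        rcases getD_pySetD_cases v curr 1 j' 0 with h' | h'
        · rw [h']; exact hv01 j'
        · rw [h']; exact Or.inr rfl
      · intro d hd
        rw [hlen']
        rcases List.mem_append.1 hd with hd | hd
        · exact hq d (List.mem_cons_of_mem _ hd)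
        · exact hgv _ d (by rwa [hgNat] at hd)
  | case3 v curr rest h ih =>
    intro hgl hgv hv01 hq c hc
    rw [loopA.eq_def]; dsimp only; rw [dif_neg h]
    obtain ⟨hc0, hc1⟩ := hq curr List.mem_cons_self
    have hcurr : v.getD (PySem.Int.mod curr (v.length : Int)).toNat 0 = 1 :=
      unmarked_ne v curr h hc0 hc1 hv01
    rcases List.mem_cons.1 hc with rfl | hc
    · exact loopA_mono g _ _ _ hcurr
    · exact ih hgl hgv hv01 (fun d hd => hq d (List.mem_cons_of_mem _ hd)) c hc

theorem loopA_closed (g : List (List Int)) (q v : List Int) :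
    g.length = v.length →
    (∀ (j : Nat) (x : Int), x ∈ g.getD j [] → -(v.length : Int) ≤ x ∧ x < (v.length : Int)) →
    (∀ j : Nat, v.getD j 0 = 0 ∨ v.getD j 0 = 1) →
    (∀ c ∈ q, -(v.length : Int) ≤ c ∧ c < (v.length : Int)) →
    (∀ j : Nat, v.getD j 0 = 1 → ∀ x ∈ g.getD j [],
        x ∈ q ∨ v.getD (PySem.Int.mod x (v.length : Int)).toNat 0 = 1) →
    ∀ j : Nat, (loopA g q v).getD j 0 = 1 → ∀ x ∈ g.getD j [],
      (loopA g q v).getD (PySem.Int.mod x (v.length : Int)).toNat 0 = 1 := by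
  induction q, v using loopA.induct g with
  | case1 v =>
    intro _ _ _ _ hcl j hj x hx
    have e0 : loopA g [] v = v := by rw [loopA.eq_def]
    rw [e0] at hj ⊢
    rcases hcl j hj x hx with hmem | hmark
    · cases hmem
    · exact hmark
  | case2 v curr rest h ih =>
    intro hgl hgv hv01 hq hcl j hj x hx
    obtain ⟨hc0, hc1⟩ := hq curr List.mem_cons_self
    have hL : 0 < (v.length : Int) := by omega
    have hset : PySem.List.pySetD v curr 1
        = v.set (PySem.Int.mod curr (v.length : Int)).toNat 1 := pySetD_slot v curr 1 hc0 hc1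
    have hlen' : (PySem.List.pySetD v curr 1).length = v.length := PySem.List.length_pySetD _ _ _
    have hkn : (PySem.Int.mod curr (v.length : Int)).toNat < v.length := pymod_toNat_lt _ _ hL
    have hgNat : PySem.List.pyGetD g curr []
        = g.getD (PySem.Int.mod curr (v.length : Int)).toNat [] := by
      rw [pyGetD_slot g curr [] (by rw [hgl]; exact hc0) (by rw [hgl]; exact hc1), hgl]
    rw [loopA.eq_def] at hj ⊢
    dsimp only at hj ⊢
    rw [dif_pos h] at hj ⊢
    have hres := ih ?_ ?_ ?_ ?_ ?_ j hj x hx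
    · rwa [hlen'] at hres
    · rw [hlen']; exact hgl
    · intro j' x' hx'; rw [hlen']; exact hgv j' x' hx'
    · intro j'
      rcases getD_pySetD_cases v curr 1 j' 0 with h' | h'
      · rw [h']; exact hv01 j'
      · rw [h']; exact Or.inr rfl
    · intro d hd
      rw [hlen']
      rcases List.mem_append.1 hd with hd | hd
      · exact hq d (List.mem_cons_of_mem _ hd)
      · exact hgv _ d (by rwa [hgNat] at hd)
    · intro j' hj' x' hx'
      rw [hlen']
      by_cases hjc : j' = (PySem.Int.mod curr (v.length : Int)).toNat
      · subst hjc
        left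
        rw [List.mem_append, hgNat]
        exact Or.inr hx'
      · have hv' : v.getD j' 0 = 1 := by
          rw [hset, getD_set_gen _ _ _ _ _ hkn, if_neg hjc] at hj'
          exact hj'
        rcases hcl j' hv' x' hx' with hmem | hmark
        · rcases List.mem_cons.1 hmem with rfl | hmem
          · right
            rw [hset, getD_set_gen _ _ _ _ _ hkn, if_pos rfl]
          · left; exact List.mem_append_left _ hmem
        · right
          exact getD_pySetD_one_of_one v curr _ hmark
  | case3 v curr rest h ih =>
    intro hgl hgv hv01 hq hcl j hj x hx
    obtain ⟨hc0, hc1⟩ := hq curr List.mem_cons_self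
    have hcurr : v.getD (PySem.Int.mod curr (v.length : Int)).toNat 0 = 1 :=
      unmarked_ne v curr h hc0 hc1 hv01
    rw [loopA.eq_def] at hj ⊢
    dsimp only at hj ⊢
    rw [dif_neg h] at hj ⊢
    refine ih hgl hgv hv01 (fun d hd => hq d (List.mem_cons_of_mem _ hd)) ?_ j hj x hx
    intro j' hj' x' hx'
    rcases hcl j' hj' x' hx' with hmem | hmark
    · rcases List.mem_cons.1 hmem with rfl | hmem
      · exact Or.inr hcurr
      · exact Or.inl hmem
    · exact Or.inr hmark

theorem loopA_sound (g : List (List Int)) (q v : List Int) (R : Int → Prop) :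
    g.length = v.length →
    (∀ (j : Nat) (x : Int), x ∈ g.getD j [] → -(v.length : Int) ≤ x ∧ x < (v.length : Int)) →
    (∀ j : Nat, v.getD j 0 = 0 ∨ v.getD j 0 = 1) →
    (∀ c ∈ q, -(v.length : Int) ≤ c ∧ c < (v.length : Int)) →
    (∀ u : Int, 0 ≤ u → u < (v.length : Int) → R u → ∀ x ∈ g.getD u.toNat [],
        R (PySem.Int.mod x (v.length : Int))) →
    (∀ c ∈ q, R (PySem.Int.mod c (v.length : Int))) →
    (∀ j : Nat, j < v.length → v.getD j 0 = 1 → R (j : Int)) →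
    ∀ j : Nat, j < v.length → (loopA g q v).getD j 0 = 1 → R (j : Int) := by
  induction q, v using loopA.induct g with
  | case1 v =>
    intro _ _ _ _ _ _ hvR j hjlen hj
    have e0 : loopA g [] v = v := by rw [loopA.eq_def]
    exact hvR j hjlen (by rwa [e0] at hj)
  | case2 v curr rest h ih =>
    intro hgl hgv hv01 hq hRcl hqR hvR j hjlen hj
    obtain ⟨hc0, hc1⟩ := hq curr List.mem_cons_self
    have hL : 0 < (v.length : Int) := by omega
    have hset : PySem.List.pySetD v curr 1
        = v.set (PySem.Int.mod curr (v.length : Int)).toNat 1 := pySetD_slot v curr 1 hc0 hc1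
    have hlen' : (PySem.List.pySetD v curr 1).length = v.length := PySem.List.length_pySetD _ _ _
    have hkn : (PySem.Int.mod curr (v.length : Int)).toNat < v.length := pymod_toNat_lt _ _ hL
    have hgNat : PySem.List.pyGetD g curr []
        = g.getD (PySem.Int.mod curr (v.length : Int)).toNat [] := by
      rw [pyGetD_slot g curr [] (by rw [hgl]; exact hc0) (by rw [hgl]; exact hc1), hgl]
    have hRcurr : R (PySem.Int.mod curr (v.length : Int)) := hqR curr List.mem_cons_self
    rw [loopA.eq_def] at hj
    dsimp only at hj
    rw [dif_pos h] at hj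
    refine ih ?_ ?_ ?_ ?_ ?_ ?_ ?_ j (by rw [hlen']; exact hjlen) hj
    · rw [hlen']; exact hgl
    · intro j' x' hx'; rw [hlen']; exact hgv j' x' hx'
    · intro j'
      rcases getD_pySetD_cases v curr 1 j' 0 with h' | h'
      · rw [h']; exact hv01 j'
      · rw [h']; exact Or.inr rfl
    · intro d hd
      rw [hlen']
      rcases List.mem_append.1 hd with hd | hd
      · exact hq d (List.mem_cons_of_mem _ hd)
      · exact hgv _ d (by rwa [hgNat] at hd)
    · intro u hu0 hu1 hRu x' hx'
      rw [hlen'] at hu1 ⊢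
      exact hRcl u hu0 hu1 hRu x' hx'
    · intro d hd
      rw [hlen']
      rcases List.mem_append.1 hd with hd | hd
      · exact hqR d (List.mem_cons_of_mem _ hd)
      · refine hRcl (PySem.Int.mod curr (v.length : Int)) (pymod_nonneg _ _ hL)
          (pymod_lt _ _ hL) hRcurr d ?_
        rwa [hgNat] at hd
    · intro j' hj'len hj'
      by_cases hjc : j' = (PySem.Int.mod curr (v.length : Int)).toNat
      · subst hjc
        rw [pymod_cast _ _ hL]
        exact hRcurr
      · have hv' : v.getD j' 0 = 1 := by
          rw [hset, getD_set_gen _ _ _ _ _ hkn, if_neg hjc] at hj'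
          exact hj'
        exact hvR j' (by rwa [hlen'] at hj'len) hv'
  | case3 v curr rest h ih =>
    intro hgl hgv hv01 hq hRcl hqR hvR j hjlen hj
    rw [loopA.eq_def] at hj
    dsimp only at hj
    rw [dif_neg h] at hj
    exact ih hgl hgv hv01 (fun d hd => hq d (List.mem_cons_of_mem _ hd)) hRcl
      (fun d hd => hqR d (List.mem_cons_of_mem _ hd)) hvR j hjlen hj

-- ---------- counting ----------

theorem replicate_getD_zero (n j : Nat) : (List.replicate n (0 : Int)).getD j 0 = 0 := by
  rw [List.getD_eq_getElem?_getD, List.getElem?_replicate]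
  split <;> rfl

theorem sum_eq_marked_len (v : List Int)
    (hv : ∀ j : Nat, v.getD j 0 = 0 ∨ v.getD j 0 = 1) :
    v.sum = (((List.range v.length).filter (fun j => v.getD j 0 == 1)).length : Int) := by
  induction v using List.reverseRecOn with
  | nil => simp
  | append_singleton v a ih =>
    have hpre : ∀ j : Nat, j < v.length → (v ++ [a]).getD j 0 = v.getD j 0 := by
      intro j hj
      rw [List.getD_eq_getElem?_getD, List.getD_eq_getElem?_getD, List.getElem?_append_left hj]
    have hvpre : ∀ j : Nat, v.getD j 0 = 0 ∨ v.getD j 0 = 1 := by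
      intro j
      by_cases hj : j < v.length
      · rw [← hpre j hj]; exact hv j
      · rw [List.getD_eq_getElem?_getD, List.getElem?_eq_none (by omega)]
        exact Or.inl rfl
    have hlast : (v ++ [a]).getD v.length 0 = a := by
      rw [List.getD_eq_getElem?_getD, List.getElem?_append_right (le_refl _)]
      simp
    have hfilter : (List.range v.length).filter (fun j => (v ++ [a]).getD j 0 == 1)
        = (List.range v.length).filter (fun j => v.getD j 0 == 1) := by
      apply List.filter_congr
      intro j hj
      rw [hpre j (List.mem_range.1 hj)]
    have IH := ih hvpre
    have ha : a = 0 ∨ a = 1 := by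
      have := hv v.length
      rwa [hlast] at this
    rw [List.sum_append, List.length_append, List.length_singleton, List.range_succ,
      List.filter_append, List.length_append, hfilter]
    rcases ha with rfl | rfl
    · simp only [List.sum_cons, List.sum_nil, List.filter_cons, List.filter_nil, hlast]
      norm_num [IH]
    · simp only [List.sum_cons, List.sum_nil, List.filter_cons, List.filter_nil, hlast]
      norm_num [IH]
      try omega

-- ---------- B-side: generic set/count helpers ----------

theorem pySetD_split {α : Type} (v : List α) (i : Int) (x : α) :
    (∃ k, PySem.List.pySetD v i x = v.set k x) ∨ PySem.List.pySetD v i x = v := by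
  simp only [PySem.List.pySetD, PySem.List.pySet?, PySem.List.pyIdx?]
  by_cases h0 : 0 ≤ i
  · by_cases h1 : i < (v.length : Int)
    · exact Or.inl ⟨i.toNat, by simp [h0, h1]⟩
    · exact Or.inr (by simp [h0, h1])
  · by_cases h2 : -(v.length : Int) ≤ i
    · exact Or.inl ⟨v.length - (-i).toNat, by simp [h0, h2]⟩
    · exact Or.inr (by simp [h0, h2])

theorem getD_set_true (c : List Bool) (k j : Nat) (h : c.getD j false = true) :
    (c.set k true).getD j false = true := by
  by_cases hlt : k < c.length
  · rw [getD_set_gen c k true j false hlt]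
    by_cases hj : j = k
    · rw [if_pos hj]
    · rw [if_neg hj]; exact h
  · rw [List.set_eq_of_length_le (by omega)]
    exact h

theorem getD_pySetD_true (c : List Bool) (i : Int) (j : Nat) (h : c.getD j false = true) :
    (PySem.List.pySetD c i true).getD j false = true := by
  rcases pySetD_split c i true with ⟨k, hk⟩ | hk
  · rw [hk]; exact getD_set_true c k j h
  · rw [hk]; exact h

theorem countb_set_ge (c : List Bool) (k : Nat) :
    c.count true ≤ (c.set k true).count true := by
  induction c generalizing k with
  | nil => simp
  | cons a tl ih =>
    cases k with
    | zero => cases a <;> simp [List.count_cons]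
    | succ k =>
      simp only [List.set_cons_succ, List.count_cons]
      have := ih k
      omega

theorem countb_pySetD_ge (c : List Bool) (i : Int) :
    c.count true ≤ (PySem.List.pySetD c i true).count true := by
  rcases pySetD_split c i true with ⟨k, hk⟩ | hk
  · rw [hk]; exact countb_set_ge c k
  · rw [hk]

theorem countb_set_gt (c : List Bool) (k : Nat) (hk : k < c.length)
    (h : c.getD k false = false) : (c.set k true).count true = c.count true + 1 := by
  induction c generalizing k with
  | nil => simp at hk
  | cons a tl ih =>
    cases k with
    | zero =>
      have ha : a = false := by simpa using h
      subst ha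
      simp [List.count_cons]
    | succ k =>
      simp only [List.set_cons_succ, List.count_cons]
      have := ih k (by simpa using hk) (by simpa using h)
      omega

-- ---------- B-side: reads and writes through Python's index wrap ----------

theorem readC (c : List Bool) (N i : Int) (hlen : (c.length : Int) = N)
    (h0 : -N ≤ i) (h1 : i < N) :
    PySem.List.pyGetD c i false = c.getD (PySem.Int.mod i N).toNat false := by
  have h0' : -(c.length : Int) ≤ i := by omega
  have h1' : i < (c.length : Int) := by omega
  rw [pyGetD_slot c i false h0' h1', hlen]

theorem writeC (c : List Bool) (N i : Int) (hlen : (c.length : Int) = N)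
    (h0 : -N ≤ i) (h1 : i < N) :
    PySem.List.pySetD c i true = c.set (PySem.Int.mod i N).toNat true := by
  have h0' : -(c.length : Int) ≤ i := by omega
  have h1' : i < (c.length : Int) := by omega
  rw [pySetD_slot c i true h0' h1', hlen]

theorem slot_lt (c : List Bool) (N i : Int) (hlen : (c.length : Int) = N) (hN : 0 < N) :
    (PySem.Int.mod i N).toNat < c.length := by
  have := pymod_lt i N hN
  have := pymod_nonneg i N hN
  omega

theorem stepC_eq (N : Int) (c : List Bool) (ch : Bool) (p : Int × Int)
    (hlen : (c.length : Int) = N)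
    (h1 : -N ≤ p.1 - 1) (h2 : p.1 - 1 < N) (h3 : -N ≤ p.2 - 1) (h4 : p.2 - 1 < N) :
    stepC (c, ch) p =
      if c.getD (PySem.Int.mod (p.1 - 1) N).toNat false
          ≠ c.getD (PySem.Int.mod (p.2 - 1) N).toNat false then
        ((c.set (PySem.Int.mod (p.1 - 1) N).toNat true).set
          (PySem.Int.mod (p.2 - 1) N).toNat true, true)
      else (c, ch) := by
  have hr1 := readC c N (p.1 - 1) hlen h1 h2
  have hr2 := readC c N (p.2 - 1) hlen h3 h4
  have hw1 := writeC c N (p.1 - 1) hlen h1 h2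
  have hlen' : ((c.set (PySem.Int.mod (p.1 - 1) N).toNat true).length : Int) = N := by
    rw [List.length_set]; exact hlen
  have hw2 := writeC (c.set (PySem.Int.mod (p.1 - 1) N).toNat true) N (p.2 - 1) hlen' h3 h4
  simp only [stepC, hr1, hr2, hw1, hw2]

-- ---------- B-side: structural invariants of a sweep ----------

theorem stepC_fst_len (st : List Bool × Bool) (p : Int × Int) :
    (stepC st p).1.length = st.1.length := by
  unfold stepC
  split
  · simp [PySem.List.length_pySetD]
  · rfl

theorem foldl_stepC_len (l : List (Int × Int)) (st : List Bool × Bool) :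
    (l.foldl stepC st).1.length = st.1.length := by
  induction l generalizing st with
  | nil => rfl
  | cons p l ih => rw [List.foldl_cons, ih, stepC_fst_len]

theorem passC_len (wires : List (Int × Int)) (c : List Bool) :
    (passC wires c).1.length = c.length :=
  foldl_stepC_len wires (c, false)

theorem stepC_flag (st : List Bool × Bool) (p : Int × Int) (h : st.2 = true) :
    (stepC st p).2 = true := by
  unfold stepC
  split
  · rfl
  · exact h

theorem foldl_flag (l : List (Int × Int)) (st : List Bool × Bool) (h : st.2 = true) :
    (l.foldl stepC st).2 = true := by
  induction l generalizing st with
  | nil => exact h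
  | cons p l ih => exact ih _ (stepC_flag st p h)

theorem stepC_marked (st : List Bool × Bool) (p : Int × Int) (j : Nat)
    (h : st.1.getD j false = true) : (stepC st p).1.getD j false = true := by
  unfold stepC
  split
  · exact getD_pySetD_true _ _ _ (getD_pySetD_true _ _ _ h)
  · exact h

theorem foldl_marked (l : List (Int × Int)) (st : List Bool × Bool) (j : Nat)
    (h : st.1.getD j false = true) : (l.foldl stepC st).1.getD j false = true := by
  induction l generalizing st with
  | nil => exact h
  | cons p l ih => exact ih _ (stepC_marked st p j h)

theorem loopC_marked (wires : List (Int × Int)) (fuel : Nat) (c : List Bool) (j : Nat)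
    (h : c.getD j false = true) : (loopC wires fuel c).getD j false = true := by
  induction fuel generalizing c with
  | zero => exact h
  | succ fuel ih =>
    simp only [loopC]
    split
    · exact ih _ (foldl_marked wires (c, false) j h)
    · exact foldl_marked wires (c, false) j h

theorem loopC_len (wires : List (Int × Int)) (fuel : Nat) (c : List Bool) :
    (loopC wires fuel c).length = c.length := by
  induction fuel generalizing c with
  | zero => rfl
  | succ fuel ih =>
    simp only [loopC]
    split
    · rw [ih, passC_len]
    · rw [passC_len]

-- a sweep that reports no change did nothing
theorem foldl_false_id (l : List (Int × Int)) (c : List Bool)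
    (h : (l.foldl stepC (c, false)).2 = false) : l.foldl stepC (c, false) = (c, false) := by
  induction l generalizing c with
  | nil => rfl
  | cons p l ih =>
    rw [List.foldl_cons] at h ⊢
    by_cases hc : PySem.List.pyGetD c (p.1 - 1) false ≠ PySem.List.pyGetD c (p.2 - 1) false
    · exfalso
      have : (stepC (c, false) p).2 = true := by simp only [stepC, if_pos hc]
      rw [foldl_flag l _ this] at h
      cases h
    · have he : stepC (c, false) p = (c, false) := by simp only [stepC, if_neg hc]
      rw [he] at h ⊢
      exact ih c h

theorem foldl_false_cond (l : List (Int × Int)) (c : List Bool)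
    (h : (l.foldl stepC (c, false)).2 = false) :
    ∀ p ∈ l, PySem.List.pyGetD c (p.1 - 1) false = PySem.List.pyGetD c (p.2 - 1) false := by
  induction l generalizing c with
  | nil => intro p hp; cases hp
  | cons q l ih =>
    rw [List.foldl_cons] at h
    by_cases hc : PySem.List.pyGetD c (q.1 - 1) false ≠ PySem.List.pyGetD c (q.2 - 1) false
    · exfalso
      have : (stepC (c, false) q).2 = true := by simp only [stepC, if_pos hc]
      rw [foldl_flag l _ this] at h
      cases h
    · have he : stepC (c, false) q = (c, false) := by simp only [stepC, if_neg hc]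
      rw [he] at h
      intro p hp
      rcases List.mem_cons.1 hp with rfl | hp
      · exact not_ne_iff.1 hc
      · exact ih c h p hp

-- ---------- B-side: soundness (every set flag is a reachable slot) ----------

theorem stepC_sound (N : Int) (st : List Bool × Bool) (p : Int × Int) (R : Nat → Prop)
    (hlen : (st.1.length : Int) = N)
    (h1 : -N ≤ p.1 - 1) (h2 : p.1 - 1 < N) (h3 : -N ≤ p.2 - 1) (h4 : p.2 - 1 < N)
    (hcl : (R (PySem.Int.mod (p.1 - 1) N).toNat → R (PySem.Int.mod (p.2 - 1) N).toNat) ∧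
           (R (PySem.Int.mod (p.2 - 1) N).toNat → R (PySem.Int.mod (p.1 - 1) N).toNat))
    (hm : ∀ j, st.1.getD j false = true → R j) :
    ∀ j, (stepC st p).1.getD j false = true → R j := by
  obtain ⟨c, ch⟩ := st
  rw [stepC_eq N c ch p hlen h1 h2 h3 h4]
  have hN : 0 < N := by omega
  have hk1 : (PySem.Int.mod (p.1 - 1) N).toNat < c.length := slot_lt c N _ hlen hN
  have hk2 : (PySem.Int.mod (p.2 - 1) N).toNat < c.length := slot_lt c N _ hlen hN
  split_ifs with hcond
  · intro j hj
    have hone : R (PySem.Int.mod (p.1 - 1) N).toNat ∧ R (PySem.Int.mod (p.2 - 1) N).toNat := by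
      cases hv1 : c.getD (PySem.Int.mod (p.1 - 1) N).toNat false with
      | true =>
        have hr1 := hm _ hv1
        exact ⟨hr1, hcl.1 hr1⟩
      | false =>
        have hv2 : c.getD (PySem.Int.mod (p.2 - 1) N).toNat false = true := by
          cases hv2 : c.getD (PySem.Int.mod (p.2 - 1) N).toNat false with
          | true => rfl
          | false => rw [hv1, hv2] at hcond; exact absurd rfl hcond
        have hr2 := hm _ hv2
        exact ⟨hcl.2 hr2, hr2⟩
    rw [getD_set_gen _ _ _ _ _ (by rw [List.length_set]; exact hk2)] at hj
    by_cases hj2 : j = (PySem.Int.mod (p.2 - 1) N).toNat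
    · exact hj2 ▸ hone.2
    · rw [if_neg hj2, getD_set_gen _ _ _ _ _ hk1] at hj
      by_cases hj1 : j = (PySem.Int.mod (p.1 - 1) N).toNat
      · exact hj1 ▸ hone.1
      · rw [if_neg hj1] at hj
        exact hm j hj
  · exact hm

theorem foldl_sound (N : Int) (l : List (Int × Int)) (st : List Bool × Bool) (R : Nat → Prop)
    (hlen : (st.1.length : Int) = N)
    (hb : ∀ p ∈ l, (-N ≤ p.1 - 1 ∧ p.1 - 1 < N) ∧ (-N ≤ p.2 - 1 ∧ p.2 - 1 < N))
    (hcl : ∀ p ∈ l, (R (PySem.Int.mod (p.1 - 1) N).toNat → R (PySem.Int.mod (p.2 - 1) N).toNat) ∧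
                    (R (PySem.Int.mod (p.2 - 1) N).toNat → R (PySem.Int.mod (p.1 - 1) N).toNat))
    (hm : ∀ j, st.1.getD j false = true → R j) :
    ∀ j, (l.foldl stepC st).1.getD j false = true → R j := by
  induction l generalizing st with
  | nil => exact hm
  | cons p l ih =>
    obtain ⟨⟨b1, b2⟩, b3, b4⟩ := hb p List.mem_cons_self
    refine ih _ (by rw [stepC_fst_len]; exact hlen)
      (fun q hq => hb q (List.mem_cons_of_mem _ hq))
      (fun q hq => hcl q (List.mem_cons_of_mem _ hq))
      (stepC_sound N st p R hlen b1 b2 b3 b4 (hcl p List.mem_cons_self) hm)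

theorem loopC_sound (N : Int) (wires : List (Int × Int)) (fuel : Nat) (c : List Bool)
    (R : Nat → Prop) (hlen : (c.length : Int) = N)
    (hb : ∀ p ∈ wires, (-N ≤ p.1 - 1 ∧ p.1 - 1 < N) ∧ (-N ≤ p.2 - 1 ∧ p.2 - 1 < N))
    (hcl : ∀ p ∈ wires, (R (PySem.Int.mod (p.1 - 1) N).toNat → R (PySem.Int.mod (p.2 - 1) N).toNat) ∧
                        (R (PySem.Int.mod (p.2 - 1) N).toNat → R (PySem.Int.mod (p.1 - 1) N).toNat))
    (hm : ∀ j, c.getD j false = true → R j) :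
    ∀ j, (loopC wires fuel c).getD j false = true → R j := by
  induction fuel generalizing c with
  | zero => exact hm
  | succ fuel ih =>
    simp only [loopC]
    have hpass := foldl_sound N wires (c, false) R hlen hb hcl hm
    split
    · exact ih _ (by rw [passC_len]; exact hlen) hpass
    · exact hpass

-- ---------- B-side: a changing sweep strictly grows the count ----------

theorem stepC_count_mono (st : List Bool × Bool) (p : Int × Int) :
    st.1.count true ≤ (stepC st p).1.count true := by
  unfold stepC
  split
  · exact le_trans (countb_pySetD_ge _ _) (countb_pySetD_ge _ _)
  · exact le_refl _

theorem foldl_count_mono (l : List (Int × Int)) (st : List Bool × Bool) :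
    st.1.count true ≤ (l.foldl stepC st).1.count true := by
  induction l generalizing st with
  | nil => exact le_refl _
  | cons p l ih => exact le_trans (stepC_count_mono st p) (ih _)

theorem stepC_count_strict (N : Int) (c : List Bool) (p : Int × Int)
    (hlen : (c.length : Int) = N)
    (h1 : -N ≤ p.1 - 1) (h2 : p.1 - 1 < N) (h3 : -N ≤ p.2 - 1) (h4 : p.2 - 1 < N)
    (hcond : c.getD (PySem.Int.mod (p.1 - 1) N).toNat false
        ≠ c.getD (PySem.Int.mod (p.2 - 1) N).toNat false) :
    c.count true + 1 ≤
      ((c.set (PySem.Int.mod (p.1 - 1) N).toNat true).set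
        (PySem.Int.mod (p.2 - 1) N).toNat true).count true := by
  have hN : 0 < N := by omega
  have hk1 : (PySem.Int.mod (p.1 - 1) N).toNat < c.length := slot_lt c N _ hlen hN
  have hk2 : (PySem.Int.mod (p.2 - 1) N).toNat < c.length := slot_lt c N _ hlen hN
  have hne : (PySem.Int.mod (p.1 - 1) N).toNat ≠ (PySem.Int.mod (p.2 - 1) N).toNat := by
    intro he
    rw [he] at hcond
    exact hcond rfl
  cases hv1 : c.getD (PySem.Int.mod (p.1 - 1) N).toNat false with
  | false =>
    have := countb_set_gt c _ hk1 hv1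
    have := countb_set_ge (c.set (PySem.Int.mod (p.1 - 1) N).toNat true)
      (PySem.Int.mod (p.2 - 1) N).toNat
    omega
  | true =>
    have hv2 : c.getD (PySem.Int.mod (p.2 - 1) N).toNat false = false := by
      cases hv2 : c.getD (PySem.Int.mod (p.2 - 1) N).toNat false with
      | false => rfl
      | true => rw [hv1, hv2] at hcond; exact absurd rfl hcond
    have hkeep : (c.set (PySem.Int.mod (p.1 - 1) N).toNat true).getD
        (PySem.Int.mod (p.2 - 1) N).toNat false = false := by
      rw [getD_set_gen _ _ _ _ _ hk1, if_neg (Ne.symm hne)]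
      exact hv2
    have := countb_set_gt (c.set (PySem.Int.mod (p.1 - 1) N).toNat true) _
      (by rw [List.length_set]; exact hk2) hkeep
    have := countb_set_ge c (PySem.Int.mod (p.1 - 1) N).toNat
    omega

theorem foldl_count_strict (N : Int) (l : List (Int × Int)) (c : List Bool)
    (hlen : (c.length : Int) = N)
    (hb : ∀ p ∈ l, (-N ≤ p.1 - 1 ∧ p.1 - 1 < N) ∧ (-N ≤ p.2 - 1 ∧ p.2 - 1 < N))
    (h : (l.foldl stepC (c, false)).2 = true) :
    c.count true + 1 ≤ (l.foldl stepC (c, false)).1.count true := by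
  induction l generalizing c with
  | nil => cases h
  | cons p l ih =>
    obtain ⟨⟨b1, b2⟩, b3, b4⟩ := hb p List.mem_cons_self
    rw [List.foldl_cons] at h ⊢
    rw [stepC_eq N c false p hlen b1 b2 b3 b4] at h ⊢
    by_cases hcond : c.getD (PySem.Int.mod (p.1 - 1) N).toNat false
        ≠ c.getD (PySem.Int.mod (p.2 - 1) N).toNat false
    · rw [if_pos hcond] at h ⊢
      have hstep := stepC_count_strict N c p hlen b1 b2 b3 b4 hcond
      have hmono := foldl_count_mono l
        ((c.set (PySem.Int.mod (p.1 - 1) N).toNat true).set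
          (PySem.Int.mod (p.2 - 1) N).toNat true, true)
      exact le_trans hstep hmono
    · rw [if_neg hcond] at h ⊢
      exact ih c hlen (fun q hq => hb q (List.mem_cons_of_mem _ hq)) h

-- ---------- B-side: the loop reaches a fixpoint within its fuel ----------

theorem loopC_fix (N : Int) (wires : List (Int × Int)) (fuel : Nat) (c : List Bool)
    (hlen : (c.length : Int) = N)
    (hb : ∀ p ∈ wires, (-N ≤ p.1 - 1 ∧ p.1 - 1 < N) ∧ (-N ≤ p.2 - 1 ∧ p.2 - 1 < N))
    (hfuel : c.length + 1 ≤ fuel + c.count true) :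
    (passC wires (loopC wires fuel c)).2 = false := by
  induction fuel generalizing c with
  | zero =>
    exfalso
    have := List.count_le_length (l := c) (a := true)
    omega
  | succ fuel ih =>
    simp only [loopC]
    by_cases hflag : (passC wires c).2 = true
    · rw [if_pos hflag]
      have hlen' : (((passC wires c).1.length : Int)) = N := by
        rw [passC_len]
        exact hlen
      have hlen'' : (passC wires c).1.length = c.length := passC_len wires c
      have hcount : c.count true + 1 ≤ (passC wires c).1.count true :=
        foldl_count_strict N wires c hlen hb hflag
      exact ih _ hlen' (by omega)
    · rw [if_neg hflag]
      have hid : passC wires c = (c, false) :=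
        foldl_false_id wires c (by simpa using hflag)
      have : (passC wires c).1 = c := by rw [hid]
      rw [this]
      simpa using hflag

-- ---------- B-side: the final flags mark exactly the reachable slots ----------

theorem conn0_getD (n j : Nat) (hn : 0 < n) :
    (PySem.List.pySetD (List.replicate n false) 0 true).getD j false
      = decide (j = 0) := by
  rw [PySem.List.pySetD_of_nonneg _ _ (le_refl 0)]
  have h0 : (0 : Int).toNat = 0 := rfl
  rw [h0, getD_set_gen _ _ _ _ _ (by simpa using hn)]
  by_cases hj : j = 0
  · simp [hj]
  · rw [if_neg hj]
    have hd : decide (j = 0) = false := by simp [hj]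
    rw [hd, List.getD_eq_getElem?_getD, List.getElem?_replicate]
    split <;> rfl

theorem conn0_len (n : Nat) (hn : 0 < n) :
    (PySem.List.pySetD (List.replicate n false) 0 true).length = n := by
  rw [PySem.List.length_pySetD, List.length_replicate]

theorem conn0_count (n : Nat) (hn : 0 < n) :
    (PySem.List.pySetD (List.replicate n false) 0 true).count true = 1 := by
  rw [PySem.List.pySetD_of_nonneg _ _ (le_refl 0)]
  have h0 : (0 : Int).toNat = 0 := rfl
  rw [h0, countb_set_gt _ _ (by simpa using hn) (by
    rw [List.getD_eq_getElem?_getD, List.getElem?_replicate, if_pos hn]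
    rfl)]
  simp [List.count_replicate]

theorem B_marked_iff (wires : List (Int × Int)) (hp : Pre_BFS wires) :
    ∀ j : Nat, j < wires.length + 2 →
      ((loopC wires (wires.length + 2)
          (PySem.List.pySetD (List.replicate (wires.length + 2) false) 0 true)).getD j false = true
        ↔ Reach wires (j : Int)) := by
  set n := wires.length + 2 with hn
  set N : Int := (wires.length : Int) + 2 with hN
  have hnpos : 0 < n := by omega
  have hNpos : 0 < N := by omega
  set c0 := PySem.List.pySetD (List.replicate n false) 0 true with hc0
  have hlen0 : (c0.length : Int) = N := by
    rw [hc0, conn0_len n hnpos]; omega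
  have hb : ∀ p ∈ wires, (-N ≤ p.1 - 1 ∧ p.1 - 1 < N) ∧ (-N ≤ p.2 - 1 ∧ p.2 - 1 < N) := by
    intro p hmem
    have := hp p hmem
    constructor <;> constructor <;> omega
  have hcl : ∀ p ∈ wires,
      (Reach wires ((PySem.Int.mod (p.1 - 1) N).toNat : Int) →
        Reach wires ((PySem.Int.mod (p.2 - 1) N).toNat : Int)) ∧
      (Reach wires ((PySem.Int.mod (p.2 - 1) N).toNat : Int) →
        Reach wires ((PySem.Int.mod (p.1 - 1) N).toNat : Int)) := by
    intro p hmem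
    have e1 : ((PySem.Int.mod (p.1 - 1) N).toNat : Int) = PySem.Int.mod (p.1 - 1) N := by
      have := pymod_nonneg (p.1 - 1) N hNpos; omega
    have e2 : ((PySem.Int.mod (p.2 - 1) N).toNat : Int) = PySem.Int.mod (p.2 - 1) N := by
      have := pymod_nonneg (p.2 - 1) N hNpos; omega
    rw [e1, e2]
    exact ⟨fun hr => hr.tail ⟨p, hmem, Or.inl ⟨rfl, rfl⟩⟩,
           fun hr => hr.tail ⟨p, hmem, Or.inr ⟨rfl, rfl⟩⟩⟩
  have hfix : (passC wires (loopC wires n c0)).2 = false := by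
    refine loopC_fix N wires n c0 hlen0 hb ?_
    rw [hc0, conn0_len n hnpos, conn0_count n hnpos]
  have hclen : ((loopC wires n c0).length : Int) = N := by
    rw [loopC_len]; exact hlen0
  have hcond := foldl_false_cond wires (loopC wires n c0) hfix
  have hzero : (loopC wires n c0).getD 0 false = true := by
    refine loopC_marked wires n c0 0 ?_
    rw [hc0, conn0_getD n 0 hnpos]
    simp
  have hcompl : ∀ x : Int, Reach wires x → (loopC wires n c0).getD x.toNat false = true := by
    intro x hx
    induction hx with
    | refl => simpa using hzero
    | @tail b c hab he ih =>
      obtain ⟨p, hmem, hcase⟩ := he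
      obtain ⟨⟨b1, b2⟩, b3, b4⟩ := hb p hmem
      have hcp := hcond p hmem
      rw [readC _ N _ hclen b1 b2, readC _ N _ hclen b3 b4] at hcp
      rcases hcase with ⟨hbv, hcv⟩ | ⟨hbv, hcv⟩
      · rw [hbv] at ih
        rw [hcv]
        rw [← hcp]
        exact ih
      · rw [hbv] at ih
        rw [hcv]
        rw [hcp]
        exact ih
  intro j hj
  constructor
  · intro hmark
    have := loopC_sound N wires n c0 (fun j => Reach wires (j : Int)) hlen0 hb hcl ?_ j hmark
    · exact this
    · intro j' hj'
      rw [hc0, conn0_getD n j' hnpos] at hj'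
      have : j' = 0 := by simpa using hj'
      subst this
      exact Relation.ReflTransGen.refl
  · intro hreach
    have := hcompl (j : Int) hreach
    simpa using this

-- ---------- counting a Bool list ----------

theorem countb_eq_filter (c : List Bool) :
    c.count true = ((List.range c.length).filter (fun j => c.getD j false)).length := by
  induction c using List.reverseRecOn with
  | nil => simp
  | append_singleton v a ih =>
    have hpre : ∀ j : Nat, j < v.length → (v ++ [a]).getD j false = v.getD j false := by
      intro j hj
      rw [List.getD_eq_getElem?_getD, List.getD_eq_getElem?_getD, List.getElem?_append_left hj]
    have hlast : (v ++ [a]).getD v.length false = a := by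
      rw [List.getD_eq_getElem?_getD, List.getElem?_append_right (le_refl _)]
      simp
    have hfilter : (List.range v.length).filter (fun j => (v ++ [a]).getD j false)
        = (List.range v.length).filter (fun j => v.getD j false) := by
      apply List.filter_congr
      intro j hj
      rw [hpre j (List.mem_range.1 hj)]
    rw [List.count_append, List.length_append, List.length_singleton, List.range_succ,
      List.filter_append, List.length_append, hfilter, ← ih]
    cases a <;> simp [hlast, List.count_singleton]

theorem A_marked_iff (wires : List (Int × Int)) (hp : Pre_BFS wires) :
    ∀ j : Nat, j < wires.length + 2 →
      ((loopA (wires.foldl buildStep (List.replicate (wires.length + 2) []))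
          [0] (List.replicate (wires.length + 2) 0)).getD j 0 = 1 ↔ Reach wires (j : Int)) := by
  set G := wires.foldl buildStep (List.replicate (wires.length + 2) ([] : List Int)) with hG
  have hN : 0 < (wires.length : Int) + 2 := by omega
  have hvcast : ((List.replicate (wires.length + 2) (0 : Int)).length : Int)
      = (wires.length : Int) + 2 := by simp
  have hvlen : (List.replicate (wires.length + 2) (0 : Int)).length = wires.length + 2 := by simp
  have hgl : G.length = (List.replicate (wires.length + 2) (0 : Int)).length := by
    rw [hG, build_length]; simp
  have hgv : ∀ (j : Nat) (x : Int), x ∈ G.getD j [] →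
      -((List.replicate (wires.length + 2) (0 : Int)).length : Int) ≤ x ∧
      x < ((List.replicate (wires.length + 2) (0 : Int)).length : Int) := by
    intro j x hx
    rw [hvcast]
    obtain ⟨p, hmem, hcase⟩ := (graph_mem wires hp j x).1 hx
    have := hp p hmem
    rcases hcase with ⟨_, rfl⟩ | ⟨_, rfl⟩ <;> omega
  have hv01 : ∀ j : Nat, (List.replicate (wires.length + 2) (0 : Int)).getD j 0 = 0 ∨
      (List.replicate (wires.length + 2) (0 : Int)).getD j 0 = 1 :=
    fun j => Or.inl (replicate_getD_zero _ j)
  have hq : ∀ c ∈ [(0 : Int)],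
      -((List.replicate (wires.length + 2) (0 : Int)).length : Int) ≤ c ∧
      c < ((List.replicate (wires.length + 2) (0 : Int)).length : Int) := by
    intro c hc
    rw [List.mem_singleton] at hc
    subst hc
    rw [hvcast]
    omega
  have hclosed := loopA_closed G [0] _ hgl hgv hv01 hq (by
    intro j' hj' x' _
    rw [replicate_getD_zero] at hj'
    cases hj')
  rw [hvcast] at hclosed
  have hzero : (loopA G [0] (List.replicate (wires.length + 2) 0)).getD 0 0 = 1 := by
    have hq0 := loopA_queue G [0] _ hgl hgv hv01 hq 0 (List.mem_singleton.2 rfl)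
    rw [hvcast, pymod_small 0 _ (le_refl 0) hN] at hq0
    simpa using hq0
  have hcompl : ∀ x : Int, Reach wires x →
      (loopA G [0] (List.replicate (wires.length + 2) 0)).getD x.toNat 0 = 1 := by
    intro x hx
    induction hx with
    | refl => simpa using hzero
    | @tail b c hab he ih =>
      have hbb := reach_range wires b hab
      obtain ⟨p, hmem, hcase⟩ := he
      have hcast : ((b.toNat : Nat) : Int) = b := by omega
      rcases hcase with ⟨hb, hc⟩ | ⟨hb, hc⟩
      · have hmemg : (p.2 - 1) ∈ G.getD b.toNat [] := by
          apply (graph_mem wires hp b.toNat (p.2 - 1)).2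
          exact ⟨p, hmem, Or.inl ⟨by rw [hcast, hb], rfl⟩⟩
        have := hclosed b.toNat ih (p.2 - 1) hmemg
        rwa [hc]
      · have hmemg : (p.1 - 1) ∈ G.getD b.toNat [] := by
          apply (graph_mem wires hp b.toNat (p.1 - 1)).2
          exact ⟨p, hmem, Or.inr ⟨by rw [hcast, hb], rfl⟩⟩
        have := hclosed b.toNat ih (p.1 - 1) hmemg
        rwa [hc]
  intro j hj
  constructor
  · intro hmark
    have hsound := loopA_sound G [0] _ (Reach wires) hgl hgv hv01 hq ?_ ?_ ?_ j (by rwa [hvlen]) hmark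
    · exact hsound
    · intro u hu0 hu1 hRu x hx
      rw [hvcast] at hu1 ⊢
      obtain ⟨p, hmem, hcase⟩ := (graph_mem wires hp u.toNat x).1 hx
      have hcast : ((u.toNat : Nat) : Int) = u := by omega
      rcases hcase with ⟨hb, rfl⟩ | ⟨hb, rfl⟩
      · exact hRu.tail ⟨p, hmem, Or.inl ⟨by rw [← hcast, hb], rfl⟩⟩
      · exact hRu.tail ⟨p, hmem, Or.inr ⟨by rw [← hcast, hb], rfl⟩⟩
    · intro c hc
      rw [List.mem_singleton] at hc
      subst hc
      rw [hvcast, pymod_small 0 _ (le_refl 0) hN]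
      exact Relation.ReflTransGen.refl
    · intro j' _ hj'
      rw [replicate_getD_zero] at hj'
      cases hj'
  · intro hreach
    have := hcompl (j : Int) hreach
    simpa using this

-- ===== VERDICT (by name: the statement is the Claim_ definition above) =====
theorem BFS_spec : Claim_equal_BFS := by
  intro wires _ hp
  unfold Spec_BFS
  show BFS wires = BFS_alt wires
  simp only [BFS, BFS_alt]
  set V := loopA (wires.foldl buildStep (List.replicate (wires.length + 2) []))
    [0] (List.replicate (wires.length + 2) 0) with hV
  set C := loopC wires (wires.length + 2)
    (PySem.List.pySetD (List.replicate (wires.length + 2) false) 0 true) with hC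
  have hVlen : V.length = wires.length + 2 := by
    rw [hV, loopA_length]; simp
  have hClen : C.length = wires.length + 2 := by
    rw [hC, loopC_len, conn0_len _ (by omega)]
  have hv01 : ∀ j : Nat, V.getD j 0 = 0 ∨ V.getD j 0 = 1 := by
    rw [hV]
    exact loopA_vals _ _ _ (fun j => Or.inl (replicate_getD_zero _ j))
  have hsum := sum_eq_marked_len V hv01
  rw [hVlen] at hsum
  have hcount := countb_eq_filter C
  rw [hClen] at hcount
  have hiffA := A_marked_iff wires hp
  have hiffB := B_marked_iff wires hp
  have hfeq : (List.range (wires.length + 2)).filter (fun j => V.getD j 0 == 1)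
      = (List.range (wires.length + 2)).filter (fun j => C.getD j false) := by
    apply List.filter_congr
    intro j hj
    have hjlt := List.mem_range.1 hj
    have h1 := hiffA j hjlt
    have h2 := hiffB j hjlt
    rw [← hV] at h1
    rw [← hC] at h2
    by_cases hr : Reach wires (j : Int)
    · have e1 : V.getD j 0 = 1 := h1.2 hr
      have e2 : C.getD j false = true := h2.2 hr
      rw [e1, e2]
      simp
    · have e1 : ¬ V.getD j 0 = 1 := fun h => hr (h1.1 h)
      have e2 : C.getD j false = false := by
        cases hb : C.getD j false
        · rfl
        · exact absurd (h2.1 hb) hr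
      rw [e2]
      simpa using e1
  have hk : V.sum = (C.count true : Int) := by
    rw [hsum, hcount, hfeq]
  rw [hk]
  congr 1
  push_cast
  ring
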